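-- pv_equiv track=rewrite | github.com/pedrocanova/conversao-binaria | conversao2.py | binario_em_quartetos
-- ===== SOURCE A (Python) =====
-- def binario_em_quartetos(binario):
--     """
--     Separa um número binário em quartetos (grupos de 4 bits).
--     """
--     # Inverte para processar da direita para esquerda
--     binario_invertido = binario[::-1]
--     quartetos = []
--
--     # Divide em grupos de 4
--     for i in range(0, len(binario_invertido), 4):
--         quarteto = binario_invertido[i:i+4]
--         quartetos.append(quarteto[::-1])  # Inverte de volta
--
--     # Inverte a lista para ordem correta
--     quartetos.reverse()
--
--     return " ".join(quartetos)
-- ===== SOURCE B (Python) =====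
-- def binario_em_quartetos(binario):
--     """
--     Separa um número binário em quartetos (grupos de 4 bits).
--     Single forward pass: emit the short remainder prefix, then 4-char slices.
--     """
--     r = len(binario) % 4
--     grupos = [binario[:r]] if r else []
--     for i in range(r, len(binario), 4):
--         grupos.append(binario[i:i+4])
--     return " ".join(grupos)
-- ===== Notes on version B (the rewrite author's own statement) =====
-- stated objective: simpler
-- what changed: B replaces A's reverse-the-string, chunk, re-reverse-each-chunk, reverse-the-list pipeline by one forward pass: the length-mod-4 prefix first, then 4-character slices from that offset.
import Mathlib
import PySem

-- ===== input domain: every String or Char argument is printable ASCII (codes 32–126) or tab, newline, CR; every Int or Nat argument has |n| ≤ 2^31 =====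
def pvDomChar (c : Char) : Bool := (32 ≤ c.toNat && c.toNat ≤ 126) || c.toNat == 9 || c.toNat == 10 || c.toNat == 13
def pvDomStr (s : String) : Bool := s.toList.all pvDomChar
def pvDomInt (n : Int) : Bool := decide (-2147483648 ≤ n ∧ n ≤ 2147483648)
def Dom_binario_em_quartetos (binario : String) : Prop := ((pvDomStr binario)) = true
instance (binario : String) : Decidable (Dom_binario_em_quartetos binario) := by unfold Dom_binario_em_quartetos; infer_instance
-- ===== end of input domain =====

-- B groups the string in ONE forward pass (remainder prefix, then 4-char slices) instead of
-- A's reverse / chunk / re-reverse-each-chunk / reverse-the-list pipeline; same O(n) cost.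

-- ===== PORT A =====
def binario_em_quartetos (binario : String) : String :=
  -- binario_invertido = binario[::-1]
  let binario_invertido := (PySem.List.slice? binario.toList none none (-1)).getD []
  -- for i in range(0, len(binario_invertido), 4): quartetos.append(binario_invertido[i:i+4][::-1])
  let quartetos := (PySem.List.pyRange 0 (binario_invertido.length : Int) 4).foldl
    (fun acc i =>
      let quarteto := PySem.List.slice binario_invertido (some i) (some (i + 4))
      acc ++ [(PySem.List.slice? quarteto none none (-1)).getD []]) []
  -- quartetos.reverse(); " ".join(quartetos)
  String.ofList (PySem.Chars.join [' '] quartetos.reverse)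

-- ===== PORT B =====
def binario_em_quartetos_alt (binario : String) : String :=
  let cs := binario.toList
  -- r = len(binario) % 4
  let r : Int := PySem.Int.mod (cs.length : Int) 4
  -- grupos = [binario[:r]] if r else []
  let grupos := if r ≠ 0 then [PySem.List.slice cs none (some r)] else []
  -- for i in range(r, len(binario), 4): grupos.append(binario[i:i+4])
  let grupos := (PySem.List.pyRange r (cs.length : Int) 4).foldl
    (fun acc i => acc ++ [PySem.List.slice cs (some i) (some (i + 4))]) grupos
  String.ofList (PySem.Chars.join [' '] grupos)

-- ===== PRECONDITION & SPEC =====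
def Spec_binario_em_quartetos (binario : String) (out : String) : Prop := out = binario_em_quartetos_alt binario
instance (binario : String) (out : String) : Decidable (Spec_binario_em_quartetos binario out) := by unfold Spec_binario_em_quartetos; infer_instance

-- ===== CLAIM (what is proved, stated in full; the proofs are below) =====
def Claim_equal_binario_em_quartetos : Prop := ∀ (binario : String), Dom_binario_em_quartetos binario → Spec_binario_em_quartetos binario (binario_em_quartetos binario)

-- ===== LEMMAS AND PROOFS =====

-- A's list of groups, normalised to Nat indices (reverse, chunk, unchunk, reverse back).
def gA (cs : List Char) : List (List Char) :=
  ((List.range ((cs.length + 3) / 4)).map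
    (fun k => ((cs.reverse.drop (4 * k)).take 4).reverse)).reverse

-- B's list of groups, normalised to Nat indices (prefix of length n % 4, then 4-char slices).
def gB (cs : List Char) : List (List Char) :=
  (if cs.length % 4 ≠ 0 then [cs.take (cs.length % 4)] else []) ++
  (List.range (cs.length / 4)).map (fun k => (cs.drop (cs.length % 4 + 4 * k)).take 4)

lemma portA_eq (binario : String) :
    binario_em_quartetos binario = String.ofList (PySem.Chars.join [' '] (gA binario.toList)) := by
  unfold binario_em_quartetos gA
  simp only [PySem.List.slice?_none_none_neg_one, Option.getD_some,
    PySem.List.foldl_append_singleton_eq_map, List.nil_append, List.length_reverse]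
  rw [PySem.List.pyRange_of_pos _ _ (by norm_num), List.map_map]
  have hc : (if (0:Int) < (binario.toList.length : Int)
      then (((binario.toList.length : Int) - 0 + 4 - 1) / 4).toNat else 0)
      = (binario.toList.length + 3) / 4 := by
    split_ifs with h <;> omega
  rw [hc]
  congr 3
  apply List.map_congr_left
  intro k _
  show (PySem.List.slice binario.toList.reverse (some (0 + 4 * (k : Int)))
      (some (0 + 4 * (k : Int) + 4))).reverse = _
  rw [PySem.List.slice_toNat _ (by positivity) (by positivity),
    show ((0:Int) + 4 * (k : Int)).toNat = 4 * k from by omega,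
    show ((0:Int) + 4 * (k : Int) + 4).toNat = 4 * k + 4 from by omega,
    show 4 * k + 4 - 4 * k = 4 from by omega]

lemma portB_eq (binario : String) :
    binario_em_quartetos_alt binario = String.ofList (PySem.Chars.join [' '] (gB binario.toList)) := by
  unfold binario_em_quartetos_alt gB
  have hr : PySem.Int.mod (binario.toList.length : Int) 4 = ((binario.toList.length % 4 : Nat) : Int) := by
    exact_mod_cast PySem.Int.mod_natCast binario.toList.length 4
  simp only [hr, PySem.List.foldl_append_singleton_eq_map]
  rw [PySem.List.pyRange_of_pos _ _ (by norm_num), List.map_map]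
  have hc : (if ((binario.toList.length % 4 : Nat) : Int) < (binario.toList.length : Int)
      then (((binario.toList.length : Int) - ((binario.toList.length % 4 : Nat) : Int) + 4 - 1) / 4).toNat else 0)
      = binario.toList.length / 4 := by
    split_ifs with h <;> omega
  rw [hc]
  have hP : (if (((binario.toList.length % 4 : Nat) : Int)) ≠ 0
        then [PySem.List.slice binario.toList none (some ((binario.toList.length % 4 : Nat) : Int))]
        else ([] : List (List Char)))
      = (if binario.toList.length % 4 ≠ 0
        then [binario.toList.take (binario.toList.length % 4)] else []) := by
    by_cases h : binario.toList.length % 4 = 0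
    · have h' : binario.length % 4 = 0 := by simpa using h
      rw [if_neg (by simp [h']), if_neg (by simp [h'])]
    · rw [if_pos (by exact_mod_cast h), if_pos h, PySem.List.slice_to_natCast]
  have hM : List.map ((fun x => PySem.List.slice binario.toList (some x) (some (x + 4))) ∘
        fun k : Nat => ((binario.toList.length % 4 : Nat) : Int) + 4 * (k : Int))
        (List.range (binario.toList.length / 4))
      = List.map (fun k => (binario.toList.drop (binario.toList.length % 4 + 4 * k)).take 4)
        (List.range (binario.toList.length / 4)) := by
    apply List.map_congr_left
    intro k _
    show PySem.List.slice binario.toList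
      (some (((binario.toList.length % 4 : Nat) : Int) + 4 * (k : Int)))
      (some (((binario.toList.length % 4 : Nat) : Int) + 4 * (k : Int) + 4)) = _
    rw [PySem.List.slice_toNat _ (by positivity) (by positivity),
      show (((binario.toList.length % 4 : Nat) : Int) + 4 * (k : Int)).toNat
        = binario.toList.length % 4 + 4 * k from by omega,
      show (((binario.toList.length % 4 : Nat) : Int) + 4 * (k : Int) + 4).toNat
        = binario.toList.length % 4 + 4 * k + 4 from by omega,
      show binario.toList.length % 4 + 4 * k + 4 - (binario.toList.length % 4 + 4 * k) = 4 from by omega]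
  rw [hP, hM]

lemma peelA (cs : List Char) (h : 5 ≤ cs.length) :
    gA cs = gA (cs.take (cs.length - 4)) ++ [cs.drop (cs.length - 4)] := by
  unfold gA
  have hm : (cs.take (cs.length - 4)).length = cs.length - 4 := by rw [List.length_take]; omega
  have hq : (cs.length + 3) / 4 = ((cs.length - 4) + 3) / 4 + 1 := by omega
  rw [hm, hq, List.range_succ_eq_map, List.map_cons, List.map_map, List.reverse_cons]
  congr 1
  · congr 1
    apply List.map_congr_left
    intro k _
    show ((cs.reverse.drop (4 * (k + 1))).take 4).reverse = _
    rw [show 4 * (k + 1) = 4 + 4 * k by ring, ← List.drop_drop, List.drop_reverse]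
  · rw [Nat.mul_zero, List.drop_zero, List.take_reverse, List.reverse_reverse]

lemma peelB (cs : List Char) (h : 5 ≤ cs.length) :
    gB cs = gB (cs.take (cs.length - 4)) ++ [cs.drop (cs.length - 4)] := by
  unfold gB
  have hm : (cs.take (cs.length - 4)).length = cs.length - 4 := by rw [List.length_take]; omega
  have hr : (cs.length - 4) % 4 = cs.length % 4 := by omega
  have hq : cs.length / 4 = (cs.length - 4) / 4 + 1 := by omega
  rw [hm, hr, hq, List.range_succ, List.map_append, List.map_singleton, List.append_assoc]
  congr 2
  · -- the remainder prefix is the same for cs and its length-4-shorter prefix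
    rw [List.take_take, Nat.min_eq_left (by omega)]
  · -- full 4-char groups before the last one are unaffected by dropping the last 4 chars
    apply List.map_congr_left
    intro k hk
    rw [List.mem_range] at hk
    rw [List.drop_take, List.take_take, Nat.min_eq_left (by omega)]
  · -- the peeled-off last group
    rw [show cs.length % 4 + 4 * ((cs.length - 4) / 4) = cs.length - 4 by omega,
      List.take_of_length_le (by rw [List.length_drop]; omega)]

lemma gA_small (cs : List Char) (h1 : 1 ≤ cs.length) (h4 : cs.length ≤ 4) : gA cs = [cs] := by
  unfold gA
  have hq : (cs.length + 3) / 4 = 1 := by omega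
  rw [hq, List.range_one]
  simp only [List.map_cons, List.map_nil, Nat.mul_zero, List.drop_zero, List.reverse_cons,
    List.reverse_nil, List.nil_append]
  rw [List.take_of_length_le (by simpa using h4), List.reverse_reverse]

lemma gB_small (cs : List Char) (h1 : 1 ≤ cs.length) (h4 : cs.length ≤ 4) : gB cs = [cs] := by
  unfold gB
  rcases Nat.lt_or_ge cs.length 4 with h | h
  · have hr : cs.length % 4 = cs.length := Nat.mod_eq_of_lt h
    have hq : cs.length / 4 = 0 := Nat.div_eq_of_lt h
    have hne : cs.length ≠ 0 := by omega
    rw [hr, hq]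
    simp [List.take_length, hne]
  · have h4' : cs.length = 4 := by omega
    rw [h4']
    simp [List.take_of_length_le (by omega)]

lemma gA_eq_gB (cs : List Char) : gA cs = gB cs := by
  induction h : cs.length using Nat.strong_induction_on generalizing cs with
  | _ n ih =>
    subst h
    rcases Nat.eq_zero_or_pos cs.length with h0 | h0
    · rw [List.eq_nil_of_length_eq_zero h0]
      rfl
    · rcases Nat.lt_or_ge 4 cs.length with h4 | h4
      · rw [peelA cs (by omega), peelB cs (by omega),
            ih (cs.take (cs.length - 4)).length (by simp; omega) _ rfl]
      · rw [gA_small cs h0 h4, gB_small cs h0 h4]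

-- ===== VERDICT (by name: the statement is the Claim_ definition above) =====
theorem binario_em_quartetos_spec : Claim_equal_binario_em_quartetos := by
  intro binario _
  unfold Spec_binario_em_quartetos
  rw [portA_eq, portB_eq, gA_eq_gB]
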